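-- pv_equiv track=rewrite | github.com/fescofesco/CCC | Challenge 2025/Felix/level5/debug_step21_careful.py | get_path_version2
-- ===== SOURCE A (Python) =====
-- def get_path_version2(x_sequence, y_sequence):
--     """Version 2: Move first, THEN record position"""
--     path = [(0, 0)]  # Start at origin
--     x_pos, y_pos = 0, 0
--     x_idx, y_idx = 0, 0
--     x_elapsed, y_elapsed = 0, 0
--
--     max_time = 1000
--     time = 0
--
--     while time < max_time:
--         if x_idx >= len(x_sequence) and y_idx >= len(y_sequence):
--             break
--
--         time += 1
--
--         # Move first
--         if x_idx < len(x_sequence):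
--             x_pace = x_sequence[x_idx]
--             pace_duration = abs(x_pace) if x_pace != 0 else 1
--
--             if x_elapsed == 0 and x_pace != 0:
--                 x_pos += 1 if x_pace > 0 else -1
--
--             x_elapsed += 1
--             if x_elapsed >= pace_duration:
--                 x_idx += 1
--                 x_elapsed = 0
--
--         if y_idx < len(y_sequence):
--             y_pace = y_sequence[y_idx]
--             pace_duration = abs(y_pace) if y_pace != 0 else 1
--
--             if y_elapsed == 0 and y_pace != 0:
--                 y_pos += 1 if y_pace > 0 else -1
--
--             y_elapsed += 1
--             if y_elapsed >= pace_duration: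
--                 y_idx += 1
--                 y_elapsed = 0
--
--         # Then record
--         path.append((x_pos, y_pos))
--
--     return path
-- ===== SOURCE B (Python) =====
-- def get_path_version2(x_sequence, y_sequence):
--     """Per-axis timelines (capped at the 1000-tick limit), then zip with hold-last padding."""
--     def timeline(seq):
--         tl = []
--         pos = 0
--         for pace in seq:
--             if len(tl) >= 1000:
--                 break
--             if pace != 0:
--                 pos += 1 if pace > 0 else -1
--                 dur = abs(pace)
--             else:
--                 dur = 1
--             tl.extend([pos] * min(dur, 1000 - len(tl)))
--         return tl
--
--     xt = timeline(x_sequence)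
--     yt = timeline(y_sequence)
--     T = min(1000, max(len(xt), len(yt)))
--     xf = xt[-1] if xt else 0
--     yf = yt[-1] if yt else 0
--     return [(0, 0)] + [(xt[t] if t < len(xt) else xf,
--                         yt[t] if t < len(yt) else yf) for t in range(T)]
-- ===== Notes on version B (the rewrite author's own statement) =====
-- stated objective: alternative
-- what changed: Replaces A's single lockstep while-loop state machine (per-axis index, elapsed counter and position advanced tick by tick) by computing each axis's position timeline independently (capped at the 1000-tick limit) and then zipping the two timelines with hold-last padding.
import Mathlib
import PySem

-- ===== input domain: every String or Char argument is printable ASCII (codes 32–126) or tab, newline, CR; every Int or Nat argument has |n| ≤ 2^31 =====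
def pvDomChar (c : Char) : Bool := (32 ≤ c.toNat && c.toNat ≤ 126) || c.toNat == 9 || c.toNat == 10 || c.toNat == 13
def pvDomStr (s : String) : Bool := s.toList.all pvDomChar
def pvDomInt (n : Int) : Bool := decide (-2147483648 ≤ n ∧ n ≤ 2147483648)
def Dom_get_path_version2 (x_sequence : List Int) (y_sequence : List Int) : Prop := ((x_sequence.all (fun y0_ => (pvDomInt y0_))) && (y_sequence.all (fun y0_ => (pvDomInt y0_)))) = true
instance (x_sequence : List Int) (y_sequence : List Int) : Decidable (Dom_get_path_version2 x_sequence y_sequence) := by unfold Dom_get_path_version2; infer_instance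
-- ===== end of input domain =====

-- B computes each axis's position timeline independently (capped at the 1000-tick limit) and zips
-- the two timelines with hold-last padding, instead of A's lockstep while-loop state machine
-- (objective: alternative decomposition, similar cost).

-- ===== PORT A =====
-- one axis's block of A's loop body (the same block appears verbatim for x and for y in A)
def pvStepA (seq : List Int) (idx : Nat) (elapsed : Nat) (pos : Int) : Int × Nat × Nat :=
  if idx < seq.length then
    let pace := seq.getD idx 0
    let dur : Nat := if pace ≠ 0 then pace.natAbs else 1
    let pos' := if elapsed = 0 ∧ pace ≠ 0 then pos + (if 0 < pace then 1 else -1) else pos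
    let elapsed' := elapsed + 1
    if dur ≤ elapsed' then (pos', idx + 1, 0) else (pos', idx, elapsed')
  else (pos, idx, elapsed)

def pvGoA (xs ys : List Int) : Nat → Nat → Nat → Nat → Nat → Int → Int → List (Int × Int) → List (Int × Int)
  | 0, _, _, _, _, _, _, path => path
  | fuel + 1, xi, yi, xe, ye, xp, yp, path =>
    if xs.length ≤ xi ∧ ys.length ≤ yi then path
    else
      let sx := pvStepA xs xi xe xp
      let sy := pvStepA ys yi ye yp
      pvGoA xs ys fuel sx.2.1 sy.2.1 sx.2.2 sy.2.2 sx.1 sy.1 (path ++ [(sx.1, sy.1)])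

def get_path_version2 (x_sequence : List Int) (y_sequence : List Int) : List (Int × Int) :=
  pvGoA x_sequence y_sequence 1000 0 0 0 0 0 0 [(0, 0)]

-- ===== PORT B =====
-- B's per-axis timeline loop (for .. with break, extend by min(dur, 1000 - len))
def pvTlCap : List Int → Int → List Int → List Int
  | [], _, tl => tl
  | p :: r, pos, tl =>
    if 1000 ≤ tl.length then tl
    else
      let pos' := if p ≠ 0 then pos + (if 0 < p then 1 else -1) else pos
      let dur : Nat := if p ≠ 0 then p.natAbs else 1
      pvTlCap r pos' (tl ++ List.replicate (min dur (1000 - tl.length)) pos')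

def get_path_version2_alt (x_sequence : List Int) (y_sequence : List Int) : List (Int × Int) :=
  let xt := pvTlCap x_sequence 0 []
  let yt := pvTlCap y_sequence 0 []
  let T := min 1000 (max xt.length yt.length)
  let xf := xt.getLast?.getD 0
  let yf := yt.getLast?.getD 0
  (0, 0) :: (List.range T).map (fun t => (xt.getD t xf, yt.getD t yf))

-- ===== PRECONDITION & SPEC =====
def Spec_get_path_version2 (x_sequence : List Int) (y_sequence : List Int) (out : List (Int × Int)) : Prop := out = get_path_version2_alt x_sequence y_sequence
instance (x_sequence : List Int) (y_sequence : List Int) (out : List (Int × Int)) : Decidable (Spec_get_path_version2 x_sequence y_sequence out) := by unfold Spec_get_path_version2; infer_instance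

-- ===== CLAIM (what is proved, stated in full; the proofs are below) =====
def Claim_equal_get_path_version2 : Prop := ∀ (x_sequence : List Int) (y_sequence : List Int), Dom_get_path_version2 x_sequence y_sequence → Spec_get_path_version2 x_sequence y_sequence (get_path_version2 x_sequence y_sequence)

-- ===== LEMMAS AND PROOFS =====

-- uncapped absolute-position timeline of one axis
def pvDur (p : Int) : Nat := if p ≠ 0 then p.natAbs else 1
def pvMv (pos p : Int) : Int := if p ≠ 0 then pos + (if 0 < p then 1 else -1) else pos

def pvTl : List Int → Int → List Int
  | [], _ => []
  | p :: r, pos => List.replicate (pvDur p) (pvMv pos p) ++ pvTl r (pvMv pos p)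

-- timeline remaining from a mid-pace loop state of A
def pvTlS : List Int → Nat → Int → List Int
  | [], _, _ => []
  | p :: r, e, pos =>
    if e = 0 then pvTl (p :: r) pos else List.replicate (pvDur p - e) pos ++ pvTl r pos

-- invariant on A's axis state
def pvInv : List Int → Nat → Prop
  | [], e => e = 0
  | p :: _, e => e < pvDur p

-- the zipped remainder of A's loop
def pvBuildF : Nat → List Int → List Int → Int → Int → List (Int × Int)
  | 0, _, _, _, _ => []
  | n + 1, a, b, fa, fb =>
    if a = [] ∧ b = [] then []
    else (a.headD fa, b.headD fb) :: pvBuildF n a.tail b.tail (a.headD fa) (b.headD fb)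

theorem pvDur_pos (p : Int) : 0 < pvDur p := by
  unfold pvDur; split
  · rename_i h; exact Int.natAbs_pos.mpr h
  · omega

theorem pvRep_ne_nil {α : Type} (n : Nat) (h : 0 < n) (x : α) : List.replicate n x ≠ [] := by
  intro hh
  have := congrArg List.length hh
  simp at this
  omega

theorem pvHeadD_rep_app {α : Type} (n : Nat) (h : 0 < n) (x : α) (l : List α) (d : α) :
    (List.replicate n x ++ l).headD d = x := by
  cases n with
  | zero => omega
  | succ k => simp [List.replicate_succ]

theorem pvTail_rep_app {α : Type} (n : Nat) (h : 0 < n) (x : α) (l : List α) :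
    (List.replicate n x ++ l).tail = List.replicate (n - 1) x ++ l := by
  cases n with
  | zero => omega
  | succ k => simp [List.replicate_succ]

theorem pvTlS_zero (l : List Int) (pos : Int) : pvTlS l 0 pos = pvTl l pos := by
  cases l with
  | nil => rfl
  | cons p r => simp [pvTlS]

theorem pvInv_zero (l : List Int) : pvInv l 0 := by
  cases l with
  | nil => rfl
  | cons p r => exact pvDur_pos p

theorem pvTlS_cons (p : Int) (r : List Int) (e : Nat) (pos : Int) (he : e < pvDur p) :
    pvTlS (p :: r) e pos
      = List.replicate (pvDur p - e) (if e = 0 then pvMv pos p else pos)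
          ++ pvTl r (if e = 0 then pvMv pos p else pos) := by
  by_cases he0 : e = 0
  · subst he0; simp [pvTlS, pvTl]
  · simp [pvTlS, he0]

theorem pvTlS_eq_nil_iff (rest : List Int) (e : Nat) (pos : Int) (hInv : pvInv rest e) :
    pvTlS rest e pos = [] ↔ rest = [] := by
  cases rest with
  | nil => simp [pvTlS]
  | cons p r =>
    have hlt : e < pvDur p := hInv
    rw [pvTlS_cons p r e pos hlt]
    constructor
    · intro h
      rcases List.append_eq_nil_iff.mp h with ⟨h1, _⟩
      exact absurd h1 (pvRep_ne_nil _ (by omega) _)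
    · intro h; exact absurd h (by simp)

theorem pvStepA_spec (seq : List Int) (idx e : Nat) (pos : Int)
    (hInv : pvInv (seq.drop idx) e) (hlt : idx < seq.length) :
    (pvStepA seq idx e pos).1 = (pvTlS (seq.drop idx) e pos).headD pos ∧
    pvTlS (seq.drop (pvStepA seq idx e pos).2.1) (pvStepA seq idx e pos).2.2 (pvStepA seq idx e pos).1
      = (pvTlS (seq.drop idx) e pos).tail ∧
    pvInv (seq.drop (pvStepA seq idx e pos).2.1) (pvStepA seq idx e pos).2.2 := by
  obtain ⟨p, r, hdrop⟩ : ∃ p r, seq.drop idx = p :: r := by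
    cases h : seq.drop idx with
    | nil => exact absurd (List.drop_eq_nil_iff.mp h) (by omega)
    | cons p r => exact ⟨p, r, rfl⟩
  have hget : seq.getD idx 0 = p := by
    have h1 : seq[idx]? = some p := by
      rw [← List.head?_drop, hdrop]; rfl
    simp [List.getD_eq_getElem?_getD, h1]
  have hdropsucc : seq.drop (idx + 1) = r := by
    rw [← List.drop_drop, hdrop]; rfl
  have hInv' : e < pvDur p := by rw [hdrop] at hInv; exact hInv
  have hq : (if e = 0 ∧ p ≠ 0 then pos + (if 0 < p then 1 else -1) else pos)
      = (if e = 0 then pvMv pos p else pos) := by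
    by_cases he0 : e = 0
    · subst he0
      by_cases hp : p ≠ 0 <;> simp [pvMv, hp]
    · simp [he0]
  set q : Int := if e = 0 then pvMv pos p else pos with hqdef
  have hTlS : pvTlS (seq.drop idx) e pos
      = List.replicate (pvDur p - e) q ++ pvTl r q := by
    rw [hdrop]; exact pvTlS_cons p r e pos hInv'
  have hrep : 0 < pvDur p - e := by omega
  have hhead : (pvTlS (seq.drop idx) e pos).headD pos = q := by
    rw [hTlS]; exact pvHeadD_rep_app _ hrep _ _ _
  have htail : (pvTlS (seq.drop idx) e pos).tail
      = List.replicate (pvDur p - e - 1) q ++ pvTl r q := by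
    rw [hTlS]; exact pvTail_rep_app _ hrep _ _
  unfold pvStepA
  rw [if_pos hlt]
  simp only [hget]
  have hdurdef : (if p ≠ 0 then p.natAbs else 1) = pvDur p := rfl
  simp only [hdurdef, hq]
  by_cases hdone : pvDur p ≤ e + 1
  · rw [if_pos hdone]
    refine ⟨hhead.symm, ?_, ?_⟩
    · simp only [hdropsucc]
      rw [pvTlS_zero, htail]
      have : pvDur p - e - 1 = 0 := by omega
      simp [this]
    · simp only [hdropsucc]
      exact pvInv_zero r
  · rw [if_neg hdone]
    refine ⟨hhead.symm, ?_, ?_⟩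
    · rw [hdrop] at htail
      simp only [hdrop]
      rw [pvTlS_cons p r (e + 1) q (by omega), htail]
      have h1 : (if e + 1 = 0 then pvMv q p else q) = q := by simp
      rw [h1]
      congr 1
    · simp only [hdrop]
      show e + 1 < pvDur p
      omega

theorem pvGoA_eq_buildF (fuel : Nat) :
    ∀ (xs ys : List Int) (xi yi xe ye : Nat) (xp yp : Int) (acc : List (Int × Int)),
    pvInv (xs.drop xi) xe → pvInv (ys.drop yi) ye →
    pvGoA xs ys fuel xi yi xe ye xp yp acc
      = acc ++ pvBuildF fuel (pvTlS (xs.drop xi) xe xp) (pvTlS (ys.drop yi) ye yp) xp yp := by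
  induction fuel with
  | zero => intro xs ys xi yi xe ye xp yp acc _ _; simp [pvGoA, pvBuildF]
  | succ n ih =>
    intro xs ys xi yi xe ye xp yp acc hIx hIy
    rw [pvGoA, pvBuildF]
    by_cases hbr : xs.length ≤ xi ∧ ys.length ≤ yi
    · have hx0 : xs.drop xi = [] := List.drop_eq_nil_iff.mpr hbr.1
      have hy0 : ys.drop yi = [] := List.drop_eq_nil_iff.mpr hbr.2
      rw [if_pos hbr, if_pos ⟨(pvTlS_eq_nil_iff _ _ xp hIx).mpr hx0, (pvTlS_eq_nil_iff _ _ yp hIy).mpr hy0⟩]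
      simp
    · rw [if_neg hbr]
      have hne : ¬ (pvTlS (xs.drop xi) xe xp = [] ∧ pvTlS (ys.drop yi) ye yp = []) := by
        intro ⟨h1, h2⟩
        exact hbr ⟨List.drop_eq_nil_iff.mp ((pvTlS_eq_nil_iff _ _ xp hIx).mp h1),
                   List.drop_eq_nil_iff.mp ((pvTlS_eq_nil_iff _ _ yp hIy).mp h2)⟩
      rw [if_neg hne]
      -- per-axis facts (moving or exhausted)
      have hxfacts :
          (pvStepA xs xi xe xp).1 = (pvTlS (xs.drop xi) xe xp).headD xp ∧
          pvTlS (xs.drop (pvStepA xs xi xe xp).2.1) (pvStepA xs xi xe xp).2.2 (pvStepA xs xi xe xp).1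
            = (pvTlS (xs.drop xi) xe xp).tail ∧
          pvInv (xs.drop (pvStepA xs xi xe xp).2.1) (pvStepA xs xi xe xp).2.2 := by
        by_cases hlt : xi < xs.length
        · exact pvStepA_spec xs xi xe xp hIx hlt
        · have hnil : xs.drop xi = [] := List.drop_eq_nil_iff.mpr (by omega)
          unfold pvStepA
          rw [if_neg hlt]
          simp [hnil, pvTlS]
          exact hnil ▸ hIx
      have hyfacts :
          (pvStepA ys yi ye yp).1 = (pvTlS (ys.drop yi) ye yp).headD yp ∧
          pvTlS (ys.drop (pvStepA ys yi ye yp).2.1) (pvStepA ys yi ye yp).2.2 (pvStepA ys yi ye yp).1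
            = (pvTlS (ys.drop yi) ye yp).tail ∧
          pvInv (ys.drop (pvStepA ys yi ye yp).2.1) (pvStepA ys yi ye yp).2.2 := by
        by_cases hlt : yi < ys.length
        · exact pvStepA_spec ys yi ye yp hIy hlt
        · have hnil : ys.drop yi = [] := List.drop_eq_nil_iff.mpr (by omega)
          unfold pvStepA
          rw [if_neg hlt]
          simp [hnil, pvTlS]
          exact hnil ▸ hIy
      rw [ih xs ys _ _ _ _ _ _ _ hxfacts.2.2 hyfacts.2.2, hxfacts.2.1, hyfacts.2.1,
          hxfacts.1, hyfacts.1]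
      simp

theorem pvBuildF_eq_map (n : Nat) :
    ∀ (a b : List Int) (fa fb : Int),
    pvBuildF n a b fa fb
      = (List.range (min n (max a.length b.length))).map
          (fun t => (a.getD t (a.getLast?.getD fa), b.getD t (b.getLast?.getD fb))) := by
  induction n with
  | zero => intro a b fa fb; simp [pvBuildF]
  | succ n ih =>
    intro a b fa fb
    rw [pvBuildF]
    by_cases hnil : a = [] ∧ b = []
    · rw [if_pos hnil]; simp [hnil.1, hnil.2]
    · rw [if_neg hnil]
      have hpos : 0 < max a.length b.length := by
        rcases not_and_or.mp hnil with h | h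
        · have : a.length ≠ 0 := by simpa using h
          omega
        · have : b.length ≠ 0 := by simpa using h
          omega
      have hmin : min (n + 1) (max a.length b.length) = min n (max a.tail.length b.tail.length) + 1 := by
        simp only [List.length_tail]
        omega
      rw [hmin, List.range_succ_eq_map, List.map_cons, List.map_map]
      congr 1
      · -- heads
        have h1 : ∀ (l : List Int) (f : Int), l.getD 0 (l.getLast?.getD f) = l.headD f := by
          intro l f
          cases l with
          | nil => simp
          | cons x t => simp
        rw [h1, h1]
      · rw [ih]
        apply List.map_congr_left
        intro t _
        have h2 : ∀ (l : List Int) (f : Int),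
            l.getD (t + 1) (l.getLast?.getD f) = l.tail.getD t (l.tail.getLast?.getD (l.headD f)) := by
          intro l f
          cases l with
          | nil => simp
          | cons x s =>
            cases s with
            | nil => simp
            | cons y u =>
              cases h : (y :: u).getLast? with
              | none => simp at h
              | some v => simp [List.getLast?_cons_cons, h]
        simp only [Function.comp]
        rw [h2, h2]

theorem pvTlCap_eq_take (seq : List Int) :
    ∀ (pos : Int) (acc : List Int), acc.length ≤ 1000 →
    pvTlCap seq pos acc = acc ++ (pvTl seq pos).take (1000 - acc.length) := by
  induction seq with
  | nil => intro pos acc _; simp [pvTlCap, pvTl]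
  | cons p r ih =>
    intro pos acc hle
    rw [pvTlCap]
    by_cases hfull : 1000 ≤ acc.length
    · rw [if_pos hfull]
      have : 1000 - acc.length = 0 := by omega
      simp [this]
    · rw [if_neg hfull]
      have hmv : (if p ≠ 0 then pos + (if 0 < p then 1 else -1) else pos) = pvMv pos p := rfl
      have hdur : (if p ≠ 0 then p.natAbs else 1) = pvDur p := rfl
      simp only [hmv, hdur]
      rw [ih (pvMv pos p) _ (by simp [List.length_replicate]; omega)]
      rw [pvTl, List.append_assoc]
      congr 1
      rw [List.take_append, List.take_replicate, List.length_replicate]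
      simp only [List.length_append, List.length_replicate]
      have e1 : min (1000 - acc.length) (pvDur p) = min (pvDur p) (1000 - acc.length) :=
        Nat.min_comm _ _
      have e2 : 1000 - acc.length - pvDur p
          = 1000 - (acc.length + min (pvDur p) (1000 - acc.length)) := by omega
      rw [e1, e2]

theorem pvGetD_take_bridge (l : List Int) (t : Nat) (ht : t < 1000) :
    (l.take 1000).getD t ((l.take 1000).getLast?.getD 0) = l.getD t (l.getLast?.getD 0) := by
  by_cases hlen : l.length ≤ 1000
  · rw [List.take_of_length_le hlen]
  · have htlt : t < (l.take 1000).length := by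
      simp [List.length_take]; omega
    have htlt' : t < l.length := by omega
    rw [List.getD_eq_getElem _ _ htlt, List.getD_eq_getElem _ _ htlt']
    simp [List.getElem_take]

-- ===== VERDICT (by name: the statement is the Claim_ definition above) =====
theorem get_path_version2_spec : Claim_equal_get_path_version2 := by
  intro xs ys _
  show get_path_version2 xs ys = get_path_version2_alt xs ys
  unfold get_path_version2 get_path_version2_alt
  have hA := pvGoA_eq_buildF 1000 xs ys 0 0 0 0 0 0 [(0, 0)]
    (by cases xs with | nil => simp [pvInv] | cons p r => exact pvDur_pos p)
    (by cases ys with | nil => simp [pvInv] | cons p r => exact pvDur_pos p)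
  simp only [List.drop_zero] at hA
  have hTlS : ∀ (s : List Int), pvTlS s 0 0 = pvTl s 0 := by
    intro s; cases s with | nil => rfl | cons p r => simp [pvTlS]
  rw [hTlS, hTlS] at hA
  rw [hA, pvBuildF_eq_map]
  have hxt : pvTlCap xs 0 [] = (pvTl xs 0).take 1000 := by
    simpa using pvTlCap_eq_take xs 0 [] (by simp)
  have hyt : pvTlCap ys 0 [] = (pvTl ys 0).take 1000 := by
    simpa using pvTlCap_eq_take ys 0 [] (by simp)
  simp only [hxt, hyt]
  have hT : min 1000 (max ((pvTl xs 0).take 1000).length ((pvTl ys 0).take 1000).length)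
      = min 1000 (max (pvTl xs 0).length (pvTl ys 0).length) := by
    simp [List.length_take]
    omega
  rw [hT]
  simp only [List.cons_append, List.nil_append]
  congr 1
  apply List.map_congr_left
  intro t hmem
  have ht : t < 1000 := by
    have := List.mem_range.mp hmem
    omega
  rw [pvGetD_take_bridge _ _ ht, pvGetD_take_bridge _ _ ht]
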